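-- pv_equiv track=rewrite | github.com/wxiaoyun/leetcode | src/python/finished/divide_array_into_increasing_sequences.py | canDivideIntoSubsequences
-- ===== SOURCE A (Python) =====
-- from typing import List
--
-- def canDivideIntoSubsequences(nums: List[int], k: int) -> bool:
--     num, ncnt = -1, 0
--     for n in nums:
--         if n == num:
--             ncnt += 1
--         else:
--             num = n
--             ncnt = 1
--
--         if k * ncnt > len(nums):
--             return False
--
--     return True
-- ===== SOURCE B (Python) =====
-- from typing import List
--
-- def canDivideIntoSubsequences(nums: List[int], k: int) -> bool:
--     n = len(nums)
--     # boundary positions: the start, the end, and every index where the value changes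
--     bounds = [i for i in range(n + 1) if i == 0 or i == n or nums[i] != nums[i - 1]]
--     # the longest run of equal values is the widest gap between successive boundaries
--     longest = max((b - a for a, b in zip(bounds, bounds[1:])), default=0)
--     return k * longest <= n
-- ===== Notes on version B (the rewrite author's own statement) =====
-- stated objective: alternative
-- what changed: B replaces A's streaming counter with early exit by computing the list of change-point boundary indices, taking the widest gap between successive boundaries (the longest run), and returning a single comparison k*longest <= len(nums).
import Mathlib
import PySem

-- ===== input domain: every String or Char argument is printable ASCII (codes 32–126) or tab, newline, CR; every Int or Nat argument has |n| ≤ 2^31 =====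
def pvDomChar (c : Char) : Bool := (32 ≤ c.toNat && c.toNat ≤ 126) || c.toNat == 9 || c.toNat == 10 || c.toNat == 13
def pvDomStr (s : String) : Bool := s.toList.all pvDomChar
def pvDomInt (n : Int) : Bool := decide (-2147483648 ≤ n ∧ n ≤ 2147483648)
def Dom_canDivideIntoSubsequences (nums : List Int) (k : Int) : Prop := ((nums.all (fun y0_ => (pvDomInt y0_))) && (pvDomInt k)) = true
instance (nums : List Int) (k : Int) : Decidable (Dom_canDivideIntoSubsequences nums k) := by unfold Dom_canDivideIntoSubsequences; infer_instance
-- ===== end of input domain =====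

-- B replaces A's streaming counter with early exit by a change-point decomposition:
-- collect boundary indices where the value changes, take the widest gap between
-- successive boundaries, and return the single comparison k*longest <= len(nums).


-- ===== PORT A =====
-- A's for-loop with running (num, ncnt) state and early `return False`.
def goA (k L : Int) : Int → Int → List Int → Bool
  | _, _, [] => true
  | num, ncnt, n :: rest =>
    let num' := if n = num then num else n
    let ncnt' := if n = num then ncnt + 1 else 1
    if k * ncnt' > L then false else goA k L num' ncnt' rest

def canDivideIntoSubsequences (nums : List Int) (k : Int) : Bool :=
  goA k (nums.length : Int) (-1) 0 nums

-- ===== PORT B =====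
-- Source B's comprehension condition `i == 0 or i == n or nums[i] != nums[i-1]`;
-- whenever the first two disjuncts fail both indices are in range, so getD is exact there.
def pvIsBound (nums : List Int) (n i : Nat) : Bool :=
  i == 0 || i == n || decide (nums.getD i 0 ≠ nums.getD (i - 1) 0)

def canDivideIntoSubsequences_alt (nums : List Int) (k : Int) : Bool :=
  let n := nums.length
  let bounds := (List.range (n + 1)).filter (pvIsBound nums n)
  let gaps := (bounds.zip bounds.tail).map (fun p => p.2 - p.1)
  decide (k * ((gaps.foldl max 0 : Nat) : Int) ≤ (n : Int))

-- ===== PRECONDITION & SPEC =====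
def Spec_canDivideIntoSubsequences (nums : List Int) (k : Int) (out : Bool) : Prop := out = canDivideIntoSubsequences_alt nums k
instance (nums : List Int) (k : Int) (out : Bool) : Decidable (Spec_canDivideIntoSubsequences nums k out) := by unfold Spec_canDivideIntoSubsequences; infer_instance

-- ===== CLAIM (what is proved, stated in full; the proofs are below) =====
def Claim_equal_canDivideIntoSubsequences : Prop := ∀ (nums : List Int) (k : Int), Dom_canDivideIntoSubsequences nums k → Spec_canDivideIntoSubsequences nums k (canDivideIntoSubsequences nums k)

-- ===== LEMMAS AND PROOFS =====

-- proof-side names for the two let-bound stages of port B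
def boundsOf (xs : List Int) : List Nat :=
  (List.range (xs.length + 1)).filter (pvIsBound xs xs.length)

def gapsOf (l : List Nat) : List Nat := (l.zip l.tail).map (fun p => p.2 - p.1)

theorem alt_unfold (nums : List Int) (k : Int) :
    canDivideIntoSubsequences_alt nums k
      = decide (k * (((gapsOf (boundsOf nums)).foldl max 0 : Nat) : Int) ≤ (nums.length : Int)) := rfl

-- proof-side: the maximum counter value A's loop ever reaches from state (num, c)
def mrun (num c : Int) : List Int → Int
  | [] => 0
  | n :: xs => max (if n = num then c + 1 else 1) (mrun n (if n = num then c + 1 else 1) xs)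

theorem mrun_nonneg (num c : Int) (xs : List Int) : 0 ≤ mrun num c xs := by
  induction xs generalizing num c with
  | nil => simp [mrun]
  | cons n rest ih => simp only [mrun]; have := ih n (if n = num then c + 1 else 1); omega

-- A's loop decides exactly "k times the maximal counter is at most L"
theorem goA_eq_mrun (k L : Int) (hL : 0 ≤ L) :
    ∀ (xs : List Int) (num c : Int), 0 ≤ c →
      goA k L num c xs = decide (k * mrun num c xs ≤ L) := by
  intro xs
  induction xs with
  | nil => intro num c _; simp [goA, mrun, hL]
  | cons n rest ih =>
    intro num c hc
    have key : ∀ (nn c' : Int), 1 ≤ c' →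
        ((if L < k * c' then false else goA k L nn c' rest) =
          decide (k * max c' (mrun nn c' rest) ≤ L)) := by
      intro nn c' hc1
      by_cases hbig : L < k * c'
      · have hk : 0 < k := by nlinarith
        have hlt : L < k * max c' (mrun nn c' rest) := by
          calc L < k * c' := hbig
          _ ≤ _ := mul_le_mul_of_nonneg_left (le_max_left _ _) (le_of_lt hk)
        simp [hbig, not_le.mpr hlt]
      · push_neg at hbig
        rw [if_neg (not_lt.mpr hbig), ih nn c' (by omega)]
        simp only [decide_eq_decide]
        by_cases hk : 0 < k
        · rw [mul_max_of_nonneg _ _ (le_of_lt hk)]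
          omega
        · push_neg at hk
          have hM := mrun_nonneg nn c' rest
          have hcm : (1:ℤ) ≤ max c' (mrun nn c' rest) := le_trans hc1 (le_max_left _ _)
          have ha : k * mrun nn c' rest ≤ L := by nlinarith
          have hb : k * max c' (mrun nn c' rest) ≤ L := by nlinarith
          exact iff_of_true ha hb
    by_cases h : n = num
    · simpa [goA, mrun, h] using key num (c + 1) (by omega)
    · simpa [goA, mrun, h] using key n 1 le_rfl

-- run lengths of maximal blocks of consecutive equal values, in ℕ
def runLensN : List Int → List Nat
  | [] => []
  | x :: xs =>
      ((xs.takeWhile (fun y => y == x)).length + 1) :: runLensN (xs.dropWhile (fun y => y == x))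
termination_by l => l.length
decreasing_by
  simp only [List.length_cons]
  exact Nat.lt_succ_of_le (List.length_dropWhile_le _ _)

theorem foldl_max_acc : ∀ (l : List Int) (a : Int), 0 ≤ a → l.foldl max a = max a (l.foldl max 0) := by
  intro l
  induction l with
  | nil => intro a ha; simp; omega
  | cons x xs ih =>
    intro a ha
    simp only [List.foldl_cons]
    rw [ih (max a x) (by omega), ih (max 0 x) (by omega)]
    omega

-- one run of A's counter, absorbed into a running max
theorem mrun_run (x : Int) : ∀ (xs : List Int) (c : Int), 0 ≤ c →
    max c (mrun x c xs)
      = max (c + ((xs.takeWhile (fun y => y == x)).length : Int))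
            (mrun x 0 (xs.dropWhile (fun y => y == x))) := by
  intro xs
  induction xs with
  | nil => intro c hc; simp [mrun]
  | cons y ys ih =>
    intro c hc
    by_cases h : y = x
    · subst h
      have hih := ih (c + 1) (by omega)
      rw [List.takeWhile_cons_of_pos (by simp), List.dropWhile_cons_of_pos (by simp)]
      simp only [mrun, if_pos rfl, List.length_cons] at hih ⊢
      rw [max_comm c, max_assoc] at *
      push_cast
      push_cast at hih
      omega
    · have hb : (y == x) = false := beq_eq_false_iff_ne.mpr h
      rw [List.takeWhile_cons_of_neg (by simp [h]), List.dropWhile_cons_of_neg (by simp [h])]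
      simp only [mrun, if_neg h, List.length_nil]
      have h1 := mrun_nonneg y 1 ys
      push_cast
      omega

theorem mrun_eq_runLensN (num : Int) : ∀ xs : List Int,
    mrun num 0 xs = ((runLensN xs).map (fun (n : Nat) => (n : Int))).foldl max 0 := by
  intro xs
  induction hw : xs.length using Nat.strong_induction_on generalizing xs num with
  | _ n ih =>
    cases xs with
    | nil => simp [mrun, runLensN]
    | cons x rest =>
      have hlen := List.length_dropWhile_le (fun y => y == x) rest
      have hfresh : mrun num 0 (x :: rest) = max 1 (mrun x 1 rest) := by
        by_cases h : x = num <;> simp [mrun, h]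
      have hrun := mrun_run x rest 1 (by omega)
      have hrec : mrun x 0 (rest.dropWhile (fun y => y == x))
          = ((runLensN (rest.dropWhile (fun y => y == x))).map (fun (n : Nat) => (n : Int))).foldl max 0 := by
        refine ih (rest.dropWhile (fun y => y == x)).length ?_ x _ rfl
        rw [← hw]; simp only [List.length_cons]; omega
      rw [hfresh]
      conv_rhs => rw [runLensN]
      simp only [List.map_cons, List.foldl_cons]
      rw [foldl_max_acc _ _ (by positivity)]
      have h0 := mrun_nonneg x 1 rest
      have hT : (0:Int) ≤ ((rest.takeWhile (fun y => y == x)).length : Int) := by positivity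
      rw [← hrec]
      push_cast at hrun ⊢
      omega

-- ===== the bridge from runLensN to port B's boundary gaps =====

theorem pvIsBound_zero (nums : List Int) (n : Nat) : pvIsBound nums n 0 = true := by
  simp [pvIsBound]

theorem pvIsBound_n (nums : List Int) (n : Nat) : pvIsBound nums n n = true := by
  simp [pvIsBound]

theorem pvIsBound_of_ne (nums : List Int) (n i : Nat)
    (he : nums.getD i 0 ≠ nums.getD (i - 1) 0) : pvIsBound nums n i = true := by
  rw [List.getD_eq_getElem?_getD, List.getD_eq_getElem?_getD] at he
  simp [pvIsBound, he]

theorem pvIsBound_eq_false (nums : List Int) (n i : Nat) (h0 : i ≠ 0) (hn : i ≠ n)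
    (he : nums.getD i 0 = nums.getD (i - 1) 0) : pvIsBound nums n i = false := by
  rw [List.getD_eq_getElem?_getD, List.getD_eq_getElem?_getD] at he
  simp [pvIsBound, h0, hn, he]

theorem pvIsBound_congr (nums1 nums2 : List Int) (n1 n2 i1 i2 : Nat)
    (h0 : i1 ≠ 0) (h0' : i2 ≠ 0) (hnn : (i1 = n1) ↔ (i2 = n2))
    (hv : nums1.getD i1 0 = nums2.getD i2 0)
    (hv' : nums1.getD (i1 - 1) 0 = nums2.getD (i2 - 1) 0) :
    pvIsBound nums1 n1 i1 = pvIsBound nums2 n2 i2 := by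
  have hb : (i1 == n1) = (i2 == n2) := by
    by_cases h : i1 = n1
    · simp [h, hnn.mp h]
    · have h2 : ¬ i2 = n2 := fun hh => h (hnn.mpr hh)
      simp [h, h2]
  unfold pvIsBound
  have h1 : (i1 == 0) = false := by simp [h0]
  have h2 : (i2 == 0) = false := by simp [h0']
  rw [h1, h2, hb, hv, hv']

theorem dropWhile_head_false {α : Type} (p : α → Bool) :
    ∀ (l : List α) (h : α) (tl : List α), l.dropWhile p = h :: tl → p h = false := by
  intro l
  induction l with
  | nil => intro h tl he; simp [List.dropWhile] at he
  | cons a l ih =>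
    intro h tl he
    by_cases hp : p a = true
    · rw [List.dropWhile_cons_of_pos hp] at he
      exact ih h tl he
    · rw [List.dropWhile_cons_of_neg hp] at he
      cases he
      simpa using hp

theorem gapsOf_cons_cons (a b : Nat) (t : List Nat) :
    gapsOf (a :: b :: t) = (b - a) :: gapsOf (b :: t) := rfl

theorem gapsOf_map_add (c : Nat) : ∀ l : List Nat, gapsOf (l.map (fun j => c + j)) = gapsOf l := by
  intro l
  induction l with
  | nil => rfl
  | cons a t ih =>
    cases t with
    | nil => rfl
    | cons b t' =>
      simp only [List.map_cons] at ih ⊢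
      rw [gapsOf_cons_cons, gapsOf_cons_cons, ih]
      congr 1
      omega

theorem boundsOf_head (zs : List Int) :
    ∃ tl, boundsOf zs = 0 :: tl := by
  refine ⟨List.filter (pvIsBound zs zs.length) ((List.range zs.length).map Nat.succ), ?_⟩
  unfold boundsOf
  rw [List.range_succ_eq_map, List.filter_cons]
  simp [pvIsBound_zero]

-- main structural lemma, on an explicit run/remainder split of the list
theorem boundsOf_split (x : Int) (tw ys : List Int)
    (hall : ∀ a ∈ tw, a = x)
    (hhd : ∀ (h : Int) (tl : List Int), ys = h :: tl → h ≠ x) :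
    boundsOf (x :: (tw ++ ys))
      = 0 :: (boundsOf ys).map (fun j => (tw.length + 1) + j) := by
  have hn : (x :: (tw ++ ys)).length = (tw.length + 1) + ys.length := by
    simp only [List.length_cons, List.length_append]; omega
  have hgetlt : ∀ i < tw.length + 1, (x :: (tw ++ ys)).getD i 0 = x := by
    intro i hi
    cases i with
    | zero => rfl
    | succ j =>
      have hj : j < tw.length := by omega
      rw [List.getD_cons_succ, List.getD_eq_getElem?_getD, List.getElem?_append_left hj,
        List.getElem?_eq_getElem hj]
      simpa using hall _ (List.getElem_mem hj)
  have hgetge : ∀ q : Nat, (x :: (tw ++ ys)).getD ((tw.length + 1) + q) 0 = ys.getD q 0 := by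
    intro q
    have e : (tw.length + 1) + q = (tw.length + q) + 1 := by omega
    rw [e, List.getD_cons_succ, List.getD_eq_getElem?_getD,
      List.getElem?_append_right (by omega), List.getD_eq_getElem?_getD,
      Nat.add_sub_cancel_left]
  have hA : (List.range (tw.length + 1)).filter
      (pvIsBound (x :: (tw ++ ys)) (x :: (tw ++ ys)).length) = [0] := by
    have hnil : ((List.range tw.length).map Nat.succ).filter
        (pvIsBound (x :: (tw ++ ys)) (x :: (tw ++ ys)).length) = [] := by
      rw [List.filter_eq_nil_iff]
      intro a ha
      rcases List.mem_map.mp ha with ⟨j, hj, rfl⟩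
      have hjt : j < tw.length := List.mem_range.mp hj
      have hfalse : pvIsBound (x :: (tw ++ ys)) (x :: (tw ++ ys)).length (j + 1) = false := by
        refine pvIsBound_eq_false _ _ _ (by omega) (by rw [hn]; omega) ?_
        have e1 : (x :: (tw ++ ys)).getD (j + 1) 0 = x := hgetlt (j + 1) (by omega)
        have e2 : (x :: (tw ++ ys)).getD (j + 1 - 1) 0 = x := by
          have : j + 1 - 1 = j := by omega
          rw [this]; exact hgetlt j (by omega)
        rw [e1, e2]
      rw [Nat.succ_eq_add_one, hfalse]
      simp
    rw [List.range_succ_eq_map, List.filter_cons,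
      if_pos (pvIsBound_zero (x :: (tw ++ ys)) (x :: (tw ++ ys)).length), hnil]
  have hB : ∀ j ∈ List.range (ys.length + 1),
      (pvIsBound (x :: (tw ++ ys)) (x :: (tw ++ ys)).length ∘ (fun j => (tw.length + 1) + j)) j
        = pvIsBound ys ys.length j := by
    intro j hj
    have hjm : j ≤ ys.length := by have := List.mem_range.mp hj; omega
    simp only [Function.comp_apply]
    cases j with
    | zero =>
      rw [pvIsBound_zero]
      cases ys with
      | nil =>
        have e : (tw.length + 1) + 0 = (x :: (tw ++ ([] : List Int))).length := by rw [hn]; simp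
        rw [e]
        exact pvIsBound_n _ _
      | cons h tl =>
        apply pvIsBound_of_ne
        have e1 : (x :: (tw ++ h :: tl)).getD ((tw.length + 1) + 0) 0 = h := by
          rw [hgetge 0]; rfl
        have e2 : (x :: (tw ++ h :: tl)).getD ((tw.length + 1) + 0 - 1) 0 = x := by
          have e : (tw.length + 1) + 0 - 1 = tw.length := by omega
          rw [e]; exact hgetlt tw.length (by omega)
        rw [e1, e2]
        exact hhd h tl rfl
    | succ s =>
      refine pvIsBound_congr _ _ _ _ _ _ (by omega) (by omega) (by rw [hn]; omega) ?_ ?_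
      · exact hgetge (s + 1)
      · have e : (tw.length + 1) + (s + 1) - 1 = (tw.length + 1) + s := by omega
        have e' : s + 1 - 1 = s := by omega
        rw [e, e']
        exact hgetge s
  have hsplitrange : (x :: (tw ++ ys)).length + 1 = (tw.length + 1) + (ys.length + 1) := by
    rw [hn]; omega
  unfold boundsOf
  rw [hsplitrange, List.range_add, List.filter_append, hA, List.filter_map,
    List.filter_congr hB]
  rfl

theorem boundsOf_cons (x : Int) (rest : List Int) :
    boundsOf (x :: rest)
      = 0 :: (boundsOf (rest.dropWhile (fun y => y == x))).map
          (fun j => ((rest.takeWhile (fun y => y == x)).length + 1) + j) := by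
  have e : (rest.takeWhile (fun y => y == x)) ++ (rest.dropWhile (fun y => y == x)) = rest :=
    List.takeWhile_append_dropWhile
  have h := boundsOf_split x (rest.takeWhile (fun y => y == x)) (rest.dropWhile (fun y => y == x))
    (fun a ha => by simpa using List.mem_takeWhile_imp ha)
    (fun h tl he hx => by
      have := dropWhile_head_false (fun y => y == x) rest h tl he
      rw [hx] at this
      simp at this)
  rw [e] at h
  exact h

theorem runLensN_eq_gaps : ∀ xs : List Int, runLensN xs = gapsOf (boundsOf xs) := by
  intro xs
  induction hw : xs.length using Nat.strong_induction_on generalizing xs with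
  | _ n ih =>
    cases xs with
    | nil => simp only [runLensN]; decide
    | cons x rest =>
      have hrec : runLensN (rest.dropWhile (fun y => y == x))
          = gapsOf (boundsOf (rest.dropWhile (fun y => y == x))) := by
        refine ih (rest.dropWhile (fun y => y == x)).length ?_ _ rfl
        have := List.length_dropWhile_le (fun y => y == x) rest
        rw [← hw]; simp only [List.length_cons]; omega
      obtain ⟨tl, htl⟩ := boundsOf_head (rest.dropWhile (fun y => y == x))
      rw [boundsOf_cons, htl]
      simp only [List.map_cons]
      rw [gapsOf_cons_cons]
      have h2 : gapsOf ((((rest.takeWhile (fun y => y == x)).length + 1) + 0)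
            :: tl.map (fun j => ((rest.takeWhile (fun y => y == x)).length + 1) + j))
          = gapsOf (0 :: tl) := by
        have e : (((rest.takeWhile (fun y => y == x)).length + 1) + 0)
              :: tl.map (fun j => ((rest.takeWhile (fun y => y == x)).length + 1) + j)
            = (0 :: tl).map (fun j => ((rest.takeWhile (fun y => y == x)).length + 1) + j) := by
          simp
        rw [e, gapsOf_map_add]
      rw [h2, ← htl, ← hrec]
      conv_lhs => rw [runLensN]
      congr 1 <;> omega

theorem foldl_max_cast : ∀ (l : List Nat) (a : Nat),
    ((l.foldl max a : Nat) : Int) = (l.map (fun (n : Nat) => (n : Int))).foldl max (a : Int) := by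
  intro l
  induction l with
  | nil => intro a; rfl
  | cons x t ih =>
    intro a
    simp only [List.foldl_cons, List.map_cons]
    rw [ih (max a x), Nat.cast_max]

-- ===== VERDICT (by name: the statement is the Claim_ definition above) =====
theorem canDivideIntoSubsequences_spec : Claim_equal_canDivideIntoSubsequences := by
  unfold Claim_equal_canDivideIntoSubsequences
  intro nums k _
  unfold Spec_canDivideIntoSubsequences canDivideIntoSubsequences
  rw [alt_unfold, goA_eq_mrun k (nums.length : Int) (by positivity) nums (-1) 0 le_rfl]
  rw [mrun_eq_runLensN (-1) nums, runLensN_eq_gaps, foldl_max_cast]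
  norm_num
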